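-- pv_equiv track=rewrite | github.com/Vamsi1113/Anomaly_detector | inference/threat_detectors.py | _has_attack_progression
-- ===== SOURCE A (Python) =====
-- def _has_attack_progression(threat_types: list) -> bool:
--     """Check if threats show progression pattern"""
--     recon_types = ['Reconnaissance', 'Sensitive File Disclosure']
--     exploit_types = ['SQL Injection', 'XSS', 'Command Injection', 'Path Traversal', 'SSTI', 'RCE']
--     exfil_types = ['Data Exfiltration', 'Privilege Escalation']
--
--     has_recon = any(t in recon_types for t in threat_types)
--     has_exploit = any(t in exploit_types for t in threat_types)
--     has_exfil = any(t in exfil_types for t in threat_types)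
--
--     return has_recon and has_exploit and has_exfil
-- ===== SOURCE B (Python) =====
-- def _has_attack_progression(threat_types: list) -> bool:
--     """Check if threats show progression pattern (single pass with early exit)"""
--     recon = {'Reconnaissance', 'Sensitive File Disclosure'}
--     exploit = {'SQL Injection', 'XSS', 'Command Injection', 'Path Traversal', 'SSTI', 'RCE'}
--     exfil = {'Data Exfiltration', 'Privilege Escalation'}
--     has_recon = has_exploit = has_exfil = False
--     for t in threat_types:
--         has_recon = has_recon or t in recon
--         has_exploit = has_exploit or t in exploit
--         has_exfil = has_exfil or t in exfil
--         if has_recon and has_exploit and has_exfil: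
--             return True
--     return has_recon and has_exploit and has_exfil
-- ===== Notes on version B (the rewrite author's own statement) =====
-- stated objective: faster
-- what changed: Replaced A's three separate any()-scans over threat_types with a single loop maintaining three booleans and returning early once all three categories are seen.
import Mathlib
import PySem

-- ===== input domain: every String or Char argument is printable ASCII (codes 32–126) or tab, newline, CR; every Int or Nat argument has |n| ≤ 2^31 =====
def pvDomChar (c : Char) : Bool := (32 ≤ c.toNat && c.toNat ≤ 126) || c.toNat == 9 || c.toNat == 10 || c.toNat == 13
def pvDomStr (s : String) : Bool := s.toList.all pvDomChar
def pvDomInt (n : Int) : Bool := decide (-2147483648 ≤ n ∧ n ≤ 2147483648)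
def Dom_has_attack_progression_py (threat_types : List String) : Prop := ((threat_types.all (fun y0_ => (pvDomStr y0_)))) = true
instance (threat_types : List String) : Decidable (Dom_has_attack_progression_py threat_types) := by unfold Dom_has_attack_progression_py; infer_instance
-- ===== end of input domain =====

-- B replaces A's three separate any()-scans with a single early-exit loop over
-- threat_types maintaining three category flags (alternative decomposition, same cost).


-- ===== PORT A =====
-- A's three category lists
def pvReconTypes : List String := ["Reconnaissance", "Sensitive File Disclosure"]
def pvExploitTypes : List String := ["SQL Injection", "XSS", "Command Injection", "Path Traversal", "SSTI", "RCE"]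
def pvExfilTypes : List String := ["Data Exfiltration", "Privilege Escalation"]

def has_attack_progression_py (threat_types : List String) : Bool :=
  let has_recon := threat_types.any (fun t => pvReconTypes.contains t)
  let has_exploit := threat_types.any (fun t => pvExploitTypes.contains t)
  let has_exfil := threat_types.any (fun t => pvExfilTypes.contains t)
  has_recon && has_exploit && has_exfil

-- ===== PORT B =====
-- single loop with three flags and early return (Source B's for-loop)
def pvProgLoop (ts : List String) (r e x : Bool) : Bool :=
  match ts with
  | [] => r && e && x
  | t :: ts' =>
    let r' := r || pvReconTypes.contains t
    let e' := e || pvExploitTypes.contains t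
    let x' := x || pvExfilTypes.contains t
    if r' && e' && x' then true else pvProgLoop ts' r' e' x'

def has_attack_progression_py_alt (threat_types : List String) : Bool :=
  pvProgLoop threat_types false false false

-- ===== PRECONDITION & SPEC =====
def Spec_has_attack_progression_py (threat_types : List String) (out : Bool) : Prop := out = has_attack_progression_py_alt threat_types
instance (threat_types : List String) (out : Bool) : Decidable (Spec_has_attack_progression_py threat_types out) := by unfold Spec_has_attack_progression_py; infer_instance

-- ===== CLAIM (what is proved, stated in full; the proofs are below) =====
def Claim_equal_has_attack_progression_py : Prop := ∀ (threat_types : List String), Dom_has_attack_progression_py threat_types → Spec_has_attack_progression_py threat_types (has_attack_progression_py threat_types)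

-- ===== LEMMAS AND PROOFS =====
-- loop invariant: pvProgLoop returns the conjunction of the flags or-ed with the remaining scans
lemma pvProgLoop_eq (ts : List String) : ∀ (r e x : Bool),
    pvProgLoop ts r e x =
      ((r || ts.any (fun t => pvReconTypes.contains t)) &&
       (e || ts.any (fun t => pvExploitTypes.contains t)) &&
       (x || ts.any (fun t => pvExfilTypes.contains t))) := by
  induction ts with
  | nil => intro r e x; simp [pvProgLoop]
  | cons t ts' ih =>
    intro r e x
    simp only [pvProgLoop, ih, List.any_cons]
    cases r <;> cases e <;> cases x <;>
      cases pvReconTypes.contains t <;>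
      cases pvExploitTypes.contains t <;>
      cases pvExfilTypes.contains t <;> simp

-- ===== VERDICT (by name: the statement is the Claim_ definition above) =====
theorem has_attack_progression_py_spec : Claim_equal_has_attack_progression_py := by
  intro ts _
  unfold Spec_has_attack_progression_py has_attack_progression_py has_attack_progression_py_alt
  rw [pvProgLoop_eq]
  simp
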